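-- pv_equiv track=rewrite | github.com/rastringer/aoc_2023 | python/day_3/p_2.py | find_adjacent_coords
-- ===== SOURCE A (Python) =====
-- def is_digit_or_oob(grid, row, col):
--     return (
--         row < 0
--         or row >= len(grid)
--         or col < 0
--         or col >= len(grid[row])
--         or not grid[row][col].isdigit()
--     )
--
-- def find_adjacent_coords(grid, row_coords, col_coords):
--     coords = set()
--     for current_row in range(row_coords -1, row_coords + 2):
--         for current_col in range(col_coords -1, col_coords + 2):
--             if is_digit_or_oob(grid, current_row, current_col):
--                 continue
--             while current_col > 0 and grid[current_row][current_col - 1].isdigit():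
--                 current_col -= 1
--             coords.add((current_row, current_col))
--     return coords
-- ===== SOURCE B (Python) =====
-- def find_adjacent_coords(grid, row_coords, col_coords):
--     # Per candidate row, precompute in one pass the start index of the digit run
--     # containing each cell, then read off the three window columns directly.
--     coords = set()
--     for r in (row_coords - 1, row_coords, row_coords + 1):
--         if 0 <= r < len(grid):
--             line = grid[r]
--             starts = []
--             for i, cell in enumerate(line):
--                 if cell.isdigit() and i > 0 and line[i - 1].isdigit():
--                     starts.append(starts[i - 1])
--                 else:
--                     starts.append(i)
--             for c in range(col_coords - 1, col_coords + 2):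
--                 if 0 <= c < len(line) and line[c].isdigit():
--                     coords.add((r, starts[c]))
--     return coords
-- ===== Notes on version B (the rewrite author's own statement) =====
-- stated objective: alternative
-- what changed: Replaces A's is_digit_or_oob probe plus per-probe backward while-walk to the run start by a single left-to-right pass per in-bounds candidate row that precomputes a run-start table, from which the three window columns are read off directly.
import Mathlib
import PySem

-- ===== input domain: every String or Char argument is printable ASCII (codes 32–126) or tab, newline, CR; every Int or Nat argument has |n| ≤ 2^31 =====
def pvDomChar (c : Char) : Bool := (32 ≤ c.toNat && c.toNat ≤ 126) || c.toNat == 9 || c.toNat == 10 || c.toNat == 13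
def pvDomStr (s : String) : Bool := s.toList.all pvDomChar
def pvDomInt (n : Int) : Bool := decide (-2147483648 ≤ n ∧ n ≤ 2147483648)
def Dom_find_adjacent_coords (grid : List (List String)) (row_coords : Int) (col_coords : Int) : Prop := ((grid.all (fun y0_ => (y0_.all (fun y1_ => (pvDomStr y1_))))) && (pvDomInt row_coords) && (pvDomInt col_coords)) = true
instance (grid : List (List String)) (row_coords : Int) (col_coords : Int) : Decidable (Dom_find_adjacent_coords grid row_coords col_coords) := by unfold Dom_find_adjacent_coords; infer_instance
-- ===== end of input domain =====

-- B replaces A's per-probe backward walk (and its is_digit_or_oob helper) by a single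
-- left-to-right pass per candidate row that precomputes the run-start table; objective: alternative.

-- ===== PORT A =====
def is_digit_or_oob (grid : List (List String)) (row col : Int) : Bool :=
  -- grid[row] / grid[row][col] are only reached when the earlier bound checks passed
  -- (Python `or` short-circuits), so the `.getD` defaults are never observed.
  decide (row < 0) || decide (row ≥ PySem.List.len grid) ||
    (let cells := (PySem.List.pyGet? grid row).getD []
     decide (col < 0) || decide (col ≥ PySem.List.len cells) ||
       !(PySem.Str.strIsdigit ((PySem.List.pyGet? cells col).getD "")))

-- the `while current_col > 0 and grid[current_row][current_col - 1].isdigit()` loop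
def pvWalk (cells : List String) (c : Int) : Int :=
  if h : 0 < c ∧ PySem.Str.strIsdigit ((PySem.List.pyGet? cells (c - 1)).getD "") = true
  then pvWalk cells (c - 1)
  else c
termination_by c.toNat
decreasing_by omega

def find_adjacent_coords (grid : List (List String)) (row_coords : Int) (col_coords : Int) : List (Int × Int) :=
  (PySem.List.pyRange (row_coords - 1) (row_coords + 2) 1).foldl (fun coords current_row =>
    (PySem.List.pyRange (col_coords - 1) (col_coords + 2) 1).foldl (fun coords current_col =>
      if is_digit_or_oob grid current_row current_col then coords
      else
        PySem.Set.add coords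
          (current_row, pvWalk ((PySem.List.pyGet? grid current_row).getD []) current_col)) coords)
    PySem.Set.empty

-- ===== PORT B =====
-- one pass over the row: starts[i] = start index of the digit run containing cell i
def pvStarts (cells : List String) : List Int :=
  (PySem.List.enumerate cells).foldl (fun starts ic =>
    if PySem.Str.strIsdigit ic.2 && decide (0 < ic.1) &&
         PySem.Str.strIsdigit ((PySem.List.pyGet? cells (ic.1 - 1)).getD "")
    then starts ++ [(PySem.List.pyGet? starts (ic.1 - 1)).getD 0]   -- starts[i-1]: in range, default unobserved
    else starts ++ [ic.1]) []

def find_adjacent_coords_alt (grid : List (List String)) (row_coords : Int) (col_coords : Int) : List (Int × Int) :=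
  [row_coords - 1, row_coords, row_coords + 1].foldl (fun coords r =>
    if decide (0 ≤ r) && decide (r < PySem.List.len grid) then
      let cells := (PySem.List.pyGet? grid r).getD []   -- r in range: default unobserved
      let starts := pvStarts cells
      (PySem.List.pyRange (col_coords - 1) (col_coords + 2) 1).foldl (fun coords c =>
        if decide (0 ≤ c) && decide (c < PySem.List.len cells) &&
             PySem.Str.strIsdigit ((PySem.List.pyGet? cells c).getD "")
        then PySem.Set.add coords (r, (PySem.List.pyGet? starts c).getD 0)
        else coords) coords
    else coords) PySem.Set.empty

-- ===== PRECONDITION & SPEC =====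
def Spec_find_adjacent_coords (grid : List (List String)) (row_coords : Int) (col_coords : Int) (out : List (Int × Int)) : Prop := out = find_adjacent_coords_alt grid row_coords col_coords
instance (grid : List (List String)) (row_coords : Int) (col_coords : Int) (out : List (Int × Int)) : Decidable (Spec_find_adjacent_coords grid row_coords col_coords out) := by unfold Spec_find_adjacent_coords; infer_instance

-- ===== CLAIM (what is proved, stated in full; the proofs are below) =====
def Claim_equal_find_adjacent_coords : Prop := ∀ (grid : List (List String)) (row_coords : Int) (col_coords : Int), Dom_find_adjacent_coords grid row_coords col_coords → Spec_find_adjacent_coords grid row_coords col_coords (find_adjacent_coords grid row_coords col_coords)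

-- ===== LEMMAS AND PROOFS =====

-- `cell.isdigit()` of cell i (false off the ends, since ''.isdigit() is false)
def pvDig (cells : List String) (i : Int) : Bool :=
  PySem.Str.strIsdigit ((PySem.List.pyGet? cells i).getD "")

-- reference value of starts[i]
def pvSpecStart (cells : List String) : Nat → Int
  | 0 => 0
  | (i + 1) => if pvDig cells (i + 1) && pvDig cells i then pvSpecStart cells i else (i + 1 : Nat)

lemma pvRange3 (a : Int) : PySem.List.pyRange (a - 1) (a + 2) 1 = [a - 1, a, a + 1] := by
  rw [PySem.List.pyRange_one_cons (by omega), PySem.List.pyRange_one_cons (by omega),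
      PySem.List.pyRange_one_cons (by omega), PySem.List.pyRange_one_eq_nil (by omega)]
  norm_num

lemma pvStarts_take (cells : List String) (j : Nat) (hj : j ≤ cells.length) :
    ((PySem.List.enumerate cells).take j).foldl
      (fun starts ic =>
        if PySem.Str.strIsdigit ic.2 && decide (0 < ic.1) &&
             PySem.Str.strIsdigit ((PySem.List.pyGet? cells (ic.1 - 1)).getD "")
        then starts ++ [(PySem.List.pyGet? starts (ic.1 - 1)).getD 0]
        else starts ++ [ic.1]) [] = (List.range j).map (fun k => pvSpecStart cells k) := by
  induction j with
  | zero => simp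
  | succ k ih =>
    have hk : k < cells.length := by omega
    have henum : (PySem.List.enumerate cells)[k]? = some ((k : Int), cells[k]) := by
      rw [PySem.List.getElem?_enumerate]
      simp [List.getElem?_eq_getElem hk]
    rw [List.take_add_one, henum, Option.toList_some, List.foldl_append, ih (by omega),
        List.range_succ, List.map_append]
    simp only [List.foldl_cons, List.foldl_nil, List.map]
    have hdig : PySem.Str.strIsdigit cells[k] = pvDig cells (k : Int) := by
      simp [pvDig, List.getElem?_eq_getElem hk]
    rw [hdig]
    cases k with
    | zero => simp [pvSpecStart]
    | succ m =>
      have hcast : (((m + 1 : Nat) : Int) - 1) = (m : Int) := by push_cast; ring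
      have hpos : decide ((0 : Int) < ((m + 1 : Nat) : Int)) = true := by
        simp
      have hgd : PySem.Str.strIsdigit ((PySem.List.pyGet? cells (m : Int)).getD "") = pvDig cells (m : Int) := rfl
      rw [hcast, hpos, hgd, Bool.and_true]
      have hget : (PySem.List.pyGet? ((List.range (m + 1)).map (fun k => pvSpecStart cells k)) (m : Int)).getD 0
          = pvSpecStart cells m := by
        rw [PySem.List.pyGet?_natCast]
        simp
      have hspec : pvSpecStart cells (m + 1)
          = if pvDig cells ((m : Int) + 1) && pvDig cells (m : Int) then pvSpecStart cells m
            else ((m + 1 : Nat) : Int) := rfl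
      have hc1 : ((m + 1 : Nat) : Int) = (m : Int) + 1 := by push_cast; ring
      by_cases h1 : pvDig cells ((m : Int) + 1) = true <;>
        by_cases h2 : pvDig cells (m : Int) = true <;>
        simp [hc1, h1, h2, hspec]

lemma pvStarts_eq (cells : List String) :
    pvStarts cells = (List.range cells.length).map (fun k => pvSpecStart cells k) := by
  have := pvStarts_take cells cells.length (le_refl _)
  rwa [List.take_of_length_le (by rw [PySem.List.length_enumerate]) ] at this

lemma pvStarts_getElem (cells : List String) (i : Nat) (hi : i < cells.length) :
    (PySem.List.pyGet? (pvStarts cells) ((i : Nat) : Int)).getD 0 = pvSpecStart cells i := by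
  rw [pvStarts_eq, PySem.List.pyGet?_natCast]
  simp [List.getElem?_range hi]

lemma pvWalk_eq_specStart (cells : List String) (i : Nat) (hd : pvDig cells (i : Int) = true) :
    pvWalk cells (i : Int) = pvSpecStart cells i := by
  induction i with
  | zero =>
    rw [pvWalk]
    simp [pvSpecStart]
  | succ m ih =>
    have hc1 : ((m + 1 : Nat) : Int) = (m : Int) + 1 := by push_cast; ring
    have hd' : pvDig cells ((m : Int) + 1) = true := by rwa [hc1] at hd
    rw [pvWalk]
    have hcast : (((m + 1 : Nat) : Int) - 1) = (m : Int) := by push_cast; ring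
    rw [hcast]
    by_cases h2 : pvDig cells (m : Int) = true
    · rw [dif_pos ⟨by positivity, h2⟩, ih h2]
      have : pvSpecStart cells (m + 1)
          = if pvDig cells ((m : Int) + 1) && pvDig cells (m : Int) then pvSpecStart cells m
            else ((m + 1 : Nat) : Int) := rfl
      rw [this, hd', h2]
      simp
    · rw [dif_neg]
      · have : pvSpecStart cells (m + 1)
            = if pvDig cells ((m : Int) + 1) && pvDig cells (m : Int) then pvSpecStart cells m
              else ((m + 1 : Nat) : Int) := rfl
        simp [this, h2]
      · rintro ⟨-, hh⟩
        exact h2 hh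

-- ===== VERDICT (by name: the statement is the Claim_ definition above) =====
theorem find_adjacent_coords_spec : Claim_equal_find_adjacent_coords := by
  intro grid row col _
  unfold Spec_find_adjacent_coords find_adjacent_coords find_adjacent_coords_alt
  rw [pvRange3 row]
  apply PySem.List.foldl_congr_mem
  intro coords r _
  by_cases hr : 0 ≤ r ∧ r < (grid.length : Int)
  · rw [if_pos (by simp [PySem.List.len_eq]; omega)]
    simp only []
    apply PySem.List.foldl_congr_mem
    intro acc c _
    set cells : List String := (PySem.List.pyGet? grid r).getD [] with hcells
    by_cases hc : 0 ≤ c ∧ c < (cells.length : Int) ∧ pvDig cells c = true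
    · obtain ⟨hc0, hcl, hcd⟩ := hc
      have hcd' := hcd
      simp [pvDig] at hcd'
      have hoob : is_digit_or_oob grid r c = false := by
        simp [is_digit_or_oob, PySem.List.len_eq, ← hcells, hcd']
        omega
      have hguard : (decide (0 ≤ c) && decide (c < PySem.List.len cells) &&
          PySem.Str.strIsdigit ((PySem.List.pyGet? cells c).getD "")) = true := by
        simp [PySem.List.len_eq, hcd']
        omega
      rw [hoob, if_neg (by simp), if_pos hguard]
      have hn : c = ((c.toNat : Nat) : Int) := (Int.toNat_of_nonneg hc0).symm
      have hnl : c.toNat < cells.length := by omega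
      rw [hn]
      rw [pvWalk_eq_specStart cells c.toNat (by rwa [← hn]), pvStarts_getElem cells c.toNat hnl]
    · have hoob : is_digit_or_oob grid r c = true := by
        by_cases hc0 : 0 ≤ c
        · by_cases hcl : c < (cells.length : Int)
          · have hcd : pvDig cells c = false := by
              rcases Bool.eq_false_or_eq_true (pvDig cells c) with h | h
              · exact absurd ⟨hc0, hcl, h⟩ hc
              · exact h
            simp [pvDig] at hcd
            simp [is_digit_or_oob, PySem.List.len_eq, ← hcells, hcd]
          · simp [is_digit_or_oob, PySem.List.len_eq, ← hcells]
            omega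
        · simp [is_digit_or_oob, PySem.List.len_eq, ← hcells]
          omega
      have hguard : (decide (0 ≤ c) && decide (c < PySem.List.len cells) &&
          PySem.Str.strIsdigit ((PySem.List.pyGet? cells c).getD "")) = false := by
        by_cases hc0 : 0 ≤ c
        · by_cases hcl : c < (cells.length : Int)
          · have hcd : pvDig cells c = false := by
              rcases Bool.eq_false_or_eq_true (pvDig cells c) with h | h
              · exact absurd ⟨hc0, hcl, h⟩ hc
              · exact h
            simp [pvDig] at hcd
            simp [PySem.List.len_eq, hcd]
          · simp [PySem.List.len_eq]
            omega
        · simp [PySem.List.len_eq]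
          omega
      rw [hoob, if_pos rfl, if_neg (by simp only [hguard]; simp)]
  · rw [if_neg (by simp [PySem.List.len_eq]; omega)]
    rw [pvRange3 col]
    have hstep : ∀ (c : Int), is_digit_or_oob grid r c = true := by
      intro c
      rcases not_and_or.mp hr with h | h
      · simp [is_digit_or_oob, PySem.List.len_eq]
        omega
      · simp [is_digit_or_oob, PySem.List.len_eq]
        omega
    simp [List.foldl, hstep]
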